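-- pv_equiv track=rewrite | github.com/apache/doris | regression-test/suites/pythonudf_p0/udf_scripts/map_string_string_test.py | evaluate
-- ===== SOURCE A (Python) =====
-- def evaluate(hashMap):
--     sb = []
--     sortSet = set()
--
--     for key, value in hashMap.items():
--         sortSet.add(key + value)
--
--     for item in sorted(sortSet):
--         sb.append(item)
--
--     ans = ''.join(sb)
--     return ans
-- ===== SOURCE B (Python) =====
-- def evaluate(hashMap):
--     # Recursive merge sort whose merge step removes duplicates via a
--     # three-way comparison; no set and no library sort are used.
--     def merge(xs, ys):
--         out = []
--         i = j = 0
--         while i < len(xs) and j < len(ys):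
--             if xs[i] < ys[j]:
--                 out.append(xs[i]); i += 1
--             elif ys[j] < xs[i]:
--                 out.append(ys[j]); j += 1
--             else:  # equal: keep one copy, advance both
--                 out.append(xs[i]); i += 1; j += 1
--         out.extend(xs[i:])
--         out.extend(ys[j:])
--         return out
--     def msort(lst):
--         if len(lst) <= 1:
--             return lst
--         mid = len(lst) // 2
--         return merge(msort(lst[:mid]), msort(lst[mid:]))
--     return ''.join(msort([key + value for key, value in hashMap.items()]))
-- ===== Notes on version B (the rewrite author's own statement) =====
-- stated objective: alternative
-- what changed: Replaces set-based dedup followed by a library sort with a hand-written recursive merge sort whose three-way merge step eliminates duplicates as it merges, so neither a set nor a library sort is used.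
import Mathlib
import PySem

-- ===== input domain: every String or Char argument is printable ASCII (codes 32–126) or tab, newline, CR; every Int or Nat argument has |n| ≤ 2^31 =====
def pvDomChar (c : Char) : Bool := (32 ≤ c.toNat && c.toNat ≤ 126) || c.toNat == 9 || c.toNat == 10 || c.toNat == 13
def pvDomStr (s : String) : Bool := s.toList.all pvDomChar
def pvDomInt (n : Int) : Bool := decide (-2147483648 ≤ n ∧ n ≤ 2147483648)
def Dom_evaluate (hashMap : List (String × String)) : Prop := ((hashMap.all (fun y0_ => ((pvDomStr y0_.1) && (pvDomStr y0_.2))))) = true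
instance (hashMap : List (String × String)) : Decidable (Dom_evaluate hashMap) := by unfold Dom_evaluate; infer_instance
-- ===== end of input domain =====

-- B replaces A's set-dedup-then-library-sort by a recursive merge sort whose merge step removes duplicates (alternative decomposition, same cost).


-- ===== PORT A =====
-- for key, value in hashMap.items(): sortSet.add(key + value); then append each of sorted(sortSet); ''.join
def evaluate (hashMap : List (String × String)) : String :=
  let sortSet : PySem.Set String :=
    hashMap.foldl (fun s kv => PySem.Set.add s (kv.1 ++ kv.2)) PySem.Set.empty
  let sb : List String :=
    (PySem.List.sorted sortSet (fun x => x) false).foldl (fun acc item => acc ++ [item]) []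
  PySem.Str.join "" sb

-- ===== PORT B =====
-- Source B's merge: while both lists nonempty compare heads three ways (the index/append
-- loop rendered as the obvious structural recursion); then extend with the leftovers
def pvMerge : List String → List String → List String
  | [], ys => ys
  | x :: xs, [] => x :: xs
  | x :: xs, y :: ys =>
    if x < y then x :: pvMerge xs (y :: ys)
    else if y < x then y :: pvMerge (x :: xs) ys
    else x :: pvMerge xs ys

-- Source B's msort: length ≤ 1 returns lst, else split at len//2 (lst[:mid] = take, lst[mid:] = drop) and merge
def pvMsort (l : List String) : List String :=
  if l.length ≤ 1 then l
  else
    pvMerge (pvMsort (l.take (l.length / 2))) (pvMsort (l.drop (l.length / 2)))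
termination_by l.length
decreasing_by
  · simp only [List.length_take]; omega
  · simp only [List.length_drop]; omega

def evaluate_alt (hashMap : List (String × String)) : String :=
  PySem.Str.join "" (pvMsort (hashMap.map (fun kv => kv.1 ++ kv.2)))

-- ===== PRECONDITION & SPEC =====
def Spec_evaluate (hashMap : List (String × String)) (out : String) : Prop := out = evaluate_alt hashMap
instance (hashMap : List (String × String)) (out : String) : Decidable (Spec_evaluate hashMap out) := by unfold Spec_evaluate; infer_instance

-- ===== CLAIM (what is proved, stated in full; the proofs are below) =====
def Claim_equal_evaluate : Prop := ∀ (hashMap : List (String × String)), Dom_evaluate hashMap → Spec_evaluate hashMap (evaluate hashMap)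

-- ===== LEMMAS AND PROOFS =====

theorem mem_pvMerge (a b : List String) (x : String) : x ∈ pvMerge a b ↔ x ∈ a ∨ x ∈ b := by
  induction a, b using pvMerge.induct with
  | case1 ys => simp [pvMerge]
  | case2 y ys => simp [pvMerge]
  | case3 x' xs y ys h ih => simp [pvMerge, h, ih]; tauto
  | case4 x' xs y ys h1 h2 ih => simp [pvMerge, h1, h2, ih]; tauto
  | case5 x' xs y ys h1 h2 ih =>
    have hxy : x' = y := le_antisymm (not_lt.mp h2) (not_lt.mp h1)
    simp [pvMerge, ih, hxy]; tauto

theorem pairwise_pvMerge (a b : List String) (ha : a.Pairwise (· < ·))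
    (hb : b.Pairwise (· < ·)) : (pvMerge a b).Pairwise (· < ·) := by
  induction a, b using pvMerge.induct with
  | case1 ys => simpa [pvMerge] using hb
  | case2 y ys => simpa [pvMerge] using ha
  | case3 x xs y ys h ih =>
    rw [List.pairwise_cons] at ha
    simp only [pvMerge, if_pos h, List.pairwise_cons]
    refine ⟨fun z hz => ?_, ih ha.2 hb⟩
    rcases (mem_pvMerge _ _ _).mp hz with hz | hz
    · exact ha.1 z hz
    · rcases List.mem_cons.mp hz with rfl | hz
      · exact h
      · exact lt_trans h ((List.pairwise_cons.mp hb).1 z hz)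
  | case4 x xs y ys h1 h2 ih =>
    rw [List.pairwise_cons] at hb
    simp only [pvMerge, if_neg h1, if_pos h2, List.pairwise_cons]
    refine ⟨fun z hz => ?_, ih ha hb.2⟩
    rcases (mem_pvMerge _ _ _).mp hz with hz | hz
    · rcases List.mem_cons.mp hz with rfl | hz
      · exact h2
      · exact lt_trans h2 ((List.pairwise_cons.mp ha).1 z hz)
    · exact hb.1 z hz
  | case5 x xs y ys h1 h2 ih =>
    have hxy : x = y := le_antisymm (not_lt.mp h2) (not_lt.mp h1)
    rw [List.pairwise_cons] at ha
    rw [List.pairwise_cons] at hb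
    simp only [pvMerge, if_neg h1, if_neg h2, List.pairwise_cons]
    refine ⟨fun z hz => ?_, ih ha.2 hb.2⟩
    rcases (mem_pvMerge _ _ _).mp hz with hz | hz
    · exact ha.1 z hz
    · exact hxy ▸ hb.1 z hz

theorem pvMsort_props (l : List String) :
    (pvMsort l).Pairwise (· < ·) ∧ ∀ x, (x ∈ pvMsort l ↔ x ∈ l) := by
  induction l using pvMsort.induct with
  | case1 l h =>
    rw [pvMsort, if_pos h]
    match l, h with
    | [], _ => simp
    | [a], _ => simp
  | case2 l h ih1 ih2 =>
    rw [pvMsort, if_neg h]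
    refine ⟨pairwise_pvMerge _ _ ih1.1 ih2.1, fun x => ?_⟩
    rw [mem_pvMerge, ih1.2 x, ih2.2 x, ← List.mem_append, List.take_append_drop]

-- B's dedup merge sort equals A's sorted set
theorem pvMsort_eq_sorted_set (xs : List String) :
    pvMsort xs = PySem.List.sorted (PySem.Set.ofList xs) (fun x => x) false := by
  obtain ⟨hpw, hmem⟩ := pvMsort_props xs
  have hperm : (pvMsort xs).Perm (PySem.Set.ofList xs) := by
    rw [List.perm_ext_iff_of_nodup (hpw.imp ne_of_lt) (PySem.Set.nodup_ofList _)]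
    intro x
    rw [hmem x, PySem.Set.mem_ofList]
  exact (PySem.List.sorted_eq_of_perm_of_pairwise_lt _ _ _ hperm hpw).symm

-- ===== VERDICT (by name: the statement is the Claim_ definition above) =====
theorem evaluate_spec : Claim_equal_evaluate := by
  intro hashMap _
  unfold Spec_evaluate evaluate evaluate_alt
  simp only [PySem.List.foldl_append_singleton_eq_self, List.nil_append]
  have hset : hashMap.foldl (fun s kv => PySem.Set.add s (kv.1 ++ kv.2)) PySem.Set.empty
      = PySem.Set.ofList (hashMap.map (fun kv => kv.1 ++ kv.2)) := by
    rw [PySem.Set.ofList_eq_foldl, List.foldl_map]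
    rfl
  rw [hset, pvMsort_eq_sorted_set]
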